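-- pv_equiv track=rewrite | github.com/ReekenX/forex-backtester | research/edge_finder.py | check_filter_compatibility
-- ===== SOURCE A (Python) =====
-- from typing import Dict, List, Tuple, Callable
--
-- def check_filter_compatibility(names: Tuple[str, ...]) -> bool:
--     """Check if filter combination makes sense (no contradictions)."""
--     # Don't combine Buy + Sell
--     if "Buy" in names and "Sell" in names:
--         return False
--     # Don't combine same category opposites
--     for prefix in ["EMA50=", "EMA200=", "EMAs=", "Engulf="]:
--         vals = [n for n in names if n.startswith(prefix)]
--         if len(vals) > 1:
--             return False
--     # Don't combine conflicting SL filters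
--     sl_filters = [n for n in names if n.startswith("SL")]
--     if len(sl_filters) > 1:
--         # Allow one SL< and one SL>= (band), but not two SL< or two SL>=
--         lt_count = sum(1 for s in sl_filters if "<" in s and ">=" not in s)
--         gte_count = sum(1 for s in sl_filters if ">=" in s)
--         band_count = sum(1 for s in sl_filters if "-" in s)
--         if lt_count > 1 or gte_count > 1 or band_count > 1 or len(sl_filters) > 2:
--             return False
--         if band_count > 0 and (lt_count > 0 or gte_count > 0):
--             return False
--     # Don't combine conflicting day filters
--     day_filters = [n for n in names if n.startswith("Day=")]
--     if len(day_filters) > 1: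
--         return False
--     # Don't combine conflicting trade filters
--     trade_filters = [n for n in names if n.startswith("Trade")]
--     if len(trade_filters) > 1:
--         return False
--     return True
-- ===== SOURCE B (Python) =====
-- def check_filter_compatibility(names):
--     """Check if filter combination makes sense (no contradictions)."""
--     buy = sell = False
--     e50 = e200 = emas = eng = day = trade = 0
--     sl_total = sl_lt = sl_gte = sl_band = 0
--     for n in names:
--         if n == "Buy":
--             buy = True
--         if n == "Sell":
--             sell = True
--         if n.startswith("EMA50="):
--             e50 += 1
--         if n.startswith("EMA200="):
--             e200 += 1
--         if n.startswith("EMAs="):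
--             emas += 1
--         if n.startswith("Engulf="):
--             eng += 1
--         if n.startswith("Day="):
--             day += 1
--         if n.startswith("Trade"):
--             trade += 1
--         if n.startswith("SL"):
--             sl_total += 1
--             if "<" in n and ">=" not in n:
--                 sl_lt += 1
--             if ">=" in n:
--                 sl_gte += 1
--             if "-" in n:
--                 sl_band += 1
--     sl_ok = (sl_total <= 1
--              or (sl_lt <= 1 and sl_gte <= 1 and sl_band <= 1 and sl_total <= 2
--                  and not (sl_band > 0 and (sl_lt > 0 or sl_gte > 0))))
--     return (not (buy and sell)
--             and e50 <= 1 and e200 <= 1 and emas <= 1 and eng <= 1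
--             and sl_ok and day <= 1 and trade <= 1)
-- ===== Notes on version B (the rewrite author's own statement) =====
-- stated objective: alternative
-- what changed: Replaced A's six separate passes over names (membership tests plus repeated list-comprehension filters per category) by a single pass that accumulates all category counters in one loop, followed by a check of the accumulated counters.
import Mathlib
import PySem

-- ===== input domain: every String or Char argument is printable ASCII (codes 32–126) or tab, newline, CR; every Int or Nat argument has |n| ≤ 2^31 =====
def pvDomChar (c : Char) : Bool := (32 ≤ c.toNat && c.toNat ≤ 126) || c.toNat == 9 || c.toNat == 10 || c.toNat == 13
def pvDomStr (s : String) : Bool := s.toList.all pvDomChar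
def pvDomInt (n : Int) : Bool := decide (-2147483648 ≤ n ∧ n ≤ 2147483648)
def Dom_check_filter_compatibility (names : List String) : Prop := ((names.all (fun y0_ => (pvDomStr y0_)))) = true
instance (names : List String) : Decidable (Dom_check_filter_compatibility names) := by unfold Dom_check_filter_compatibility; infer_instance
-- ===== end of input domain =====

-- B replaces A's six separate passes over `names` by ONE fold accumulating all category
-- counters, then checks the accumulated counters (objective: alternative decomposition).

-- ===== PORT A =====
def check_filter_compatibility (names : List String) : Bool :=
  -- if "Buy" in names and "Sell" in names: return False
  if names.contains "Buy" && names.contains "Sell" then false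
  -- for prefix in [...]: if len([n for n in names if n.startswith(prefix)]) > 1: return False
  else if (["EMA50=", "EMA200=", "EMAs=", "Engulf="].any
      (fun p => (names.filter (fun n => PySem.Str.startswith n p)).length > 1)) then false
  else
    let sl_filters := names.filter (fun n => PySem.Str.startswith n "SL")
    let slBad : Bool :=
      if sl_filters.length > 1 then
        let lt_count := (sl_filters.filter
          (fun s => PySem.Str.isIn "<" s && !PySem.Str.isIn ">=" s)).length
        let gte_count := (sl_filters.filter (fun s => PySem.Str.isIn ">=" s)).length
        let band_count := (sl_filters.filter (fun s => PySem.Str.isIn "-" s)).length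
        if lt_count > 1 || gte_count > 1 || band_count > 1 || sl_filters.length > 2 then true
        else if band_count > 0 && (lt_count > 0 || gte_count > 0) then true
        else false
      else false
    if slBad then false
    else if (names.filter (fun n => PySem.Str.startswith n "Day=")).length > 1 then false
    else if (names.filter (fun n => PySem.Str.startswith n "Trade")).length > 1 then false
    else true

-- ===== PORT B =====
-- accumulator of B's single pass
structure CfcState where
  buy : Bool
  sell : Bool
  e50 : Nat
  e200 : Nat
  emas : Nat
  eng : Nat
  day : Nat
  trade : Nat
  slTotal : Nat
  slLt : Nat
  slGte : Nat
  slBand : Nat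
deriving Repr, DecidableEq

def cfcStep (st : CfcState) (n : String) : CfcState :=
  { buy := if n == "Buy" then true else st.buy
    sell := if n == "Sell" then true else st.sell
    e50 := st.e50 + (if PySem.Str.startswith n "EMA50=" then 1 else 0)
    e200 := st.e200 + (if PySem.Str.startswith n "EMA200=" then 1 else 0)
    emas := st.emas + (if PySem.Str.startswith n "EMAs=" then 1 else 0)
    eng := st.eng + (if PySem.Str.startswith n "Engulf=" then 1 else 0)
    day := st.day + (if PySem.Str.startswith n "Day=" then 1 else 0)
    trade := st.trade + (if PySem.Str.startswith n "Trade" then 1 else 0)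
    slTotal := st.slTotal + (if PySem.Str.startswith n "SL" then 1 else 0)
    slLt := st.slLt + (if PySem.Str.startswith n "SL" &&
        (PySem.Str.isIn "<" n && !PySem.Str.isIn ">=" n) then 1 else 0)
    slGte := st.slGte + (if PySem.Str.startswith n "SL" && PySem.Str.isIn ">=" n then 1 else 0)
    slBand := st.slBand + (if PySem.Str.startswith n "SL" && PySem.Str.isIn "-" n then 1 else 0) }

def cfcInit : CfcState :=
  { buy := false, sell := false, e50 := 0, e200 := 0, emas := 0, eng := 0,
    day := 0, trade := 0, slTotal := 0, slLt := 0, slGte := 0, slBand := 0 }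

def check_filter_compatibility_alt (names : List String) : Bool :=
  let st := names.foldl cfcStep cfcInit
  let slOk : Bool :=
    st.slTotal ≤ 1 ||
      (st.slLt ≤ 1 && st.slGte ≤ 1 && st.slBand ≤ 1 && st.slTotal ≤ 2 &&
        !(st.slBand > 0 && (st.slLt > 0 || st.slGte > 0)))
  !(st.buy && st.sell) && st.e50 ≤ 1 && st.e200 ≤ 1 && st.emas ≤ 1 && st.eng ≤ 1 &&
    slOk && st.day ≤ 1 && st.trade ≤ 1

-- ===== PRECONDITION & SPEC =====
def Spec_check_filter_compatibility (names : List String) (out : Bool) : Prop := out = check_filter_compatibility_alt names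
instance (names : List String) (out : Bool) : Decidable (Spec_check_filter_compatibility names out) := by unfold Spec_check_filter_compatibility; infer_instance

-- ===== CLAIM (what is proved, stated in full; the proofs are below) =====
def Claim_equal_check_filter_compatibility : Prop := ∀ (names : List String), Dom_check_filter_compatibility names → Spec_check_filter_compatibility names (check_filter_compatibility names)

-- ===== LEMMAS AND PROOFS =====

theorem cfc_fold_buy (names : List String) (s : CfcState) :
    (names.foldl cfcStep s).buy = (s.buy || names.contains "Buy") := by
  induction names generalizing s with
  | nil => simp
  | cons n rest ih =>
    simp only [List.foldl_cons, ih, List.contains_cons, cfcStep]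
    by_cases h : n == "Buy" <;> simp [h, BEq.comm]

theorem cfc_fold_sell (names : List String) (s : CfcState) :
    (names.foldl cfcStep s).sell = (s.sell || names.contains "Sell") := by
  induction names generalizing s with
  | nil => simp
  | cons n rest ih =>
    simp only [List.foldl_cons, ih, List.contains_cons, cfcStep]
    by_cases h : n == "Sell" <;> simp [h, BEq.comm]

theorem cfc_fold_count (f : CfcState → Nat) (p : String → Bool)
    (hf : ∀ s n, f (cfcStep s n) = f s + (if p n then 1 else 0)) :
    ∀ (names : List String) (s : CfcState),
      f (names.foldl cfcStep s) = f s + names.countP p := by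
  intro names
  induction names with
  | nil => simp
  | cons n rest ih =>
    intro s
    simp only [List.foldl_cons, ih, hf, List.countP_cons]
    by_cases h : p n
    · simp [h]
      omega
    · simp [h]

theorem cfc_filter_len (names : List String) (p : String → Bool) :
    (names.filter p).length = names.countP p :=
  List.countP_eq_length_filter.symm

theorem cfc_countP_filter (names : List String) (p q : String → Bool) :
    (names.filter p).countP q = names.countP (fun n => p n && q n) := by
  rw [List.countP_filter]
  exact List.countP_congr (fun a _ => by rw [Bool.and_comm])

theorem cfc_fold_e50 (names : List String) (s : CfcState) :
    (names.foldl cfcStep s).e50 = s.e50 + names.countP (fun n => PySem.Str.startswith n "EMA50=") :=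
  cfc_fold_count (·.e50) _ (fun _ _ => rfl) names s

theorem cfc_fold_e200 (names : List String) (s : CfcState) :
    (names.foldl cfcStep s).e200 = s.e200 + names.countP (fun n => PySem.Str.startswith n "EMA200=") :=
  cfc_fold_count (·.e200) _ (fun _ _ => rfl) names s

theorem cfc_fold_emas (names : List String) (s : CfcState) :
    (names.foldl cfcStep s).emas = s.emas + names.countP (fun n => PySem.Str.startswith n "EMAs=") :=
  cfc_fold_count (·.emas) _ (fun _ _ => rfl) names s

theorem cfc_fold_eng (names : List String) (s : CfcState) :
    (names.foldl cfcStep s).eng = s.eng + names.countP (fun n => PySem.Str.startswith n "Engulf=") :=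
  cfc_fold_count (·.eng) _ (fun _ _ => rfl) names s

theorem cfc_fold_day (names : List String) (s : CfcState) :
    (names.foldl cfcStep s).day = s.day + names.countP (fun n => PySem.Str.startswith n "Day=") :=
  cfc_fold_count (·.day) _ (fun _ _ => rfl) names s

theorem cfc_fold_trade (names : List String) (s : CfcState) :
    (names.foldl cfcStep s).trade = s.trade + names.countP (fun n => PySem.Str.startswith n "Trade") :=
  cfc_fold_count (·.trade) _ (fun _ _ => rfl) names s

theorem cfc_fold_slTotal (names : List String) (s : CfcState) :
    (names.foldl cfcStep s).slTotal = s.slTotal + names.countP (fun n => PySem.Str.startswith n "SL") :=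
  cfc_fold_count (·.slTotal) _ (fun _ _ => rfl) names s

theorem cfc_fold_slLt (names : List String) (s : CfcState) :
    (names.foldl cfcStep s).slLt = s.slLt + names.countP (fun n => PySem.Str.startswith n "SL" &&
      (PySem.Str.isIn "<" n && !PySem.Str.isIn ">=" n)) :=
  cfc_fold_count (·.slLt) _ (fun _ _ => rfl) names s

theorem cfc_fold_slGte (names : List String) (s : CfcState) :
    (names.foldl cfcStep s).slGte = s.slGte + names.countP (fun n => PySem.Str.startswith n "SL" &&
      PySem.Str.isIn ">=" n) :=
  cfc_fold_count (·.slGte) _ (fun _ _ => rfl) names s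

theorem cfc_fold_slBand (names : List String) (s : CfcState) :
    (names.foldl cfcStep s).slBand = s.slBand + names.countP (fun n => PySem.Str.startswith n "SL" &&
      PySem.Str.isIn "-" n) :=
  cfc_fold_count (·.slBand) _ (fun _ _ => rfl) names s

-- ===== VERDICT (by name: the statement is the Claim_ definition above) =====
set_option maxHeartbeats 1600000 in
theorem check_filter_compatibility_spec : Claim_equal_check_filter_compatibility := by
  intro names _
  unfold Spec_check_filter_compatibility check_filter_compatibility check_filter_compatibility_alt
  simp only [cfc_fold_buy, cfc_fold_sell, cfc_fold_e50, cfc_fold_e200, cfc_fold_emas,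
    cfc_fold_eng, cfc_fold_day, cfc_fold_trade, cfc_fold_slTotal, cfc_fold_slLt,
    cfc_fold_slGte, cfc_fold_slBand, cfcInit, Bool.false_or, Nat.zero_add,
    cfc_filter_len, cfc_countP_filter, List.any_cons, List.any_nil, Bool.or_false]
  generalize names.contains "Buy" = bb
  generalize names.contains "Sell" = ss
  generalize List.countP (fun n => PySem.Str.startswith n "EMA50=") names = c1
  generalize List.countP (fun n => PySem.Str.startswith n "EMA200=") names = c2
  generalize List.countP (fun n => PySem.Str.startswith n "EMAs=") names = c3
  generalize List.countP (fun n => PySem.Str.startswith n "Engulf=") names = c4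
  generalize List.countP (fun n => PySem.Str.startswith n "SL" &&
    (PySem.Str.isIn "<" n && !PySem.Str.isIn ">=" n)) names = cLt
  generalize List.countP (fun n => PySem.Str.startswith n "SL" && PySem.Str.isIn ">=" n) names = cGte
  generalize List.countP (fun n => PySem.Str.startswith n "SL" && PySem.Str.isIn "-" n) names = cBand
  generalize List.countP (fun n => PySem.Str.startswith n "SL") names = cSL
  generalize List.countP (fun n => PySem.Str.startswith n "Day=") names = cDay
  generalize List.countP (fun n => PySem.Str.startswith n "Trade") names = cTrade
  cases bb <;> cases ss <;> split_ifs <;> simp_all <;> omega
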